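-- pv_equiv track=rewrite | github.com/utah-cs3960-sp26/textedit-u0492257 | src/editor/text_editor.py | _count_unclosed_brackets
-- ===== SOURCE A (Python) =====
-- def _count_unclosed_brackets(text: str) -> int:
--     """Count net unclosed opening brackets in text."""
--     bracket_pairs = {'(': ')', '[': ']', '{': '}'}
--     closing_to_opening = {v: k for k, v in bracket_pairs.items()}
--
--     stack = []
--     in_string = None
--     escape = False
--
--     for char in text:
--         if escape:
--             escape = False
--             continue
--         if char == '\\':
--             escape = True
--             continue
--         if char in '"\'`':
--             if in_string == char:
--                 in_string = None
--             elif in_string is None: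
--                 in_string = char
--             continue
--         if in_string:
--             continue
--         if char in bracket_pairs:
--             stack.append(char)
--         elif char in closing_to_opening:
--             if stack and stack[-1] == closing_to_opening[char]:
--                 stack.pop()
--
--     return len(stack)
-- ===== SOURCE B (Python) =====
-- def _count_unclosed_brackets(text: str) -> int:
--     """Count net unclosed opening brackets in text (staged index-scan version)."""
--     n = len(text)
--     # Stage 1: index-driven scan that jumps over escaped characters and whole
--     # string literals, emitting only the brackets that survive filtering.
--     out = []
--     i = 0
--     while i < n:
--         c = text[i]
--         if c == '\\':
--             i += 2
--         elif c in '"\'`':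
--             i += 1
--             while i < n:
--                 d = text[i]
--                 if d == '\\':
--                     i += 2
--                 elif d == c:
--                     i += 1
--                     break
--                 else:
--                     i += 1
--         else:
--             if c in '()[]{}':
--                 out.append(c)
--             i += 1
--     # Stage 2: stack matching over the surviving bracket sequence.
--     pairs = {'(': ')', '[': ']', '{': '}'}
--     stack = []
--     for ch in out:
--         if stack and pairs.get(stack[-1]) == ch:
--             stack.pop()
--         elif ch in pairs:
--             stack.append(ch)
--     return len(stack)
-- ===== Notes on version B (the rewrite author's own statement) =====
-- stated objective: alternative
-- what changed: Replaces A's single fused flag-machine loop with two stages: an index-jumping scan that consumes escape pairs and whole string literals as units and emits the surviving bracket characters, followed by a separate stack-matching pass over that bracket sequence.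
import Mathlib
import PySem

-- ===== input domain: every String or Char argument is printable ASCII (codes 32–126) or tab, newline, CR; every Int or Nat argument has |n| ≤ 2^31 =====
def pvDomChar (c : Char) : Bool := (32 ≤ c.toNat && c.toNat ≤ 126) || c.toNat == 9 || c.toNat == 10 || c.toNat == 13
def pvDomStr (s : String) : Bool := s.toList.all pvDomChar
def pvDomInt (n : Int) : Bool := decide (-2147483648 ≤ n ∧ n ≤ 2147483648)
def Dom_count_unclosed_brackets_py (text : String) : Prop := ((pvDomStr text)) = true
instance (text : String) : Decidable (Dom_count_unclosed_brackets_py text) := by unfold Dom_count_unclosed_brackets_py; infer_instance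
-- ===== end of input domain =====

-- B replaces A's single fused flag-machine loop by an index-jumping scan that skips whole escaped chars / string literals to extract the surviving brackets, then a separate stack-matching pass; alternative decomposition, same cost.


-- ===== PORT A =====
-- one iteration of A's loop; state = (stack, in_string, escape); stack top is the list's last element, as in Python
def pyAStep (st : List Char × Option Char × Bool) (c : Char) : List Char × Option Char × Bool :=
  match st with
  | (stack, ins, esc) =>
    if esc then (stack, ins, false)
    else if c = '\\' then (stack, ins, true)
    else if c = '"' ∨ c = '\'' ∨ c = '`' then
      (stack, (if ins = some c then none else if ins = none then some c else ins), esc)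
    else if ins.isSome then (stack, ins, esc)
    else if c = '(' ∨ c = '[' ∨ c = '{' then (stack ++ [c], ins, esc)
    else if c = ')' ∨ c = ']' ∨ c = '}' then
      let opener := if c = ')' then '(' else if c = ']' then '[' else '{'
      if stack ≠ [] ∧ stack.getLast? = some opener then (stack.dropLast, ins, esc)
      else (stack, ins, esc)
    else (stack, ins, esc)

def count_unclosed_brackets_py (text : String) : Int :=
  ((text.toList.foldl pyAStep ([], none, false)).1.length : Int)

-- ===== PORT B =====
-- stage 1 inner loop: consume the body of a string literal opened by quote q,
-- jumping over escape pairs; returns the suffix after the closing quote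
def bSkipStr (q : Char) : List Char → List Char
  | [] => []
  | d :: rest =>
    if d = '\\' then bSkipStr q rest.tail
    else if d = q then rest
    else bSkipStr q rest
termination_by l => l.length
decreasing_by all_goals (simp [List.length_tail]; try omega)

-- the inner loop only advances the index, so the suffix only shrinks (cited by bScan's termination)
theorem bSkipStr_length_le (q : Char) (l : List Char) : (bSkipStr q l).length ≤ l.length := by
  fun_induction bSkipStr q l with
  | case1 => simp
  | case2 rest ih => simp only [List.length_tail] at ih; simp; omega
  | case3 rest h => simp
  | case4 d rest h1 h2 ih => simpa using Nat.le_succ_of_le ih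

-- stage 1 outer loop: emit the brackets surviving escape/string filtering
def bScan : List Char → List Char
  | [] => []
  | c :: rest =>
    if c = '\\' then bScan rest.tail
    else if c = '"' ∨ c = '\'' ∨ c = '`' then bScan (bSkipStr c rest)
    else if c = '(' ∨ c = ')' ∨ c = '[' ∨ c = ']' ∨ c = '{' ∨ c = '}' then c :: bScan rest
    else bScan rest
termination_by l => l.length
decreasing_by
  · simp [List.length_tail]; try omega
  · exact Nat.lt_succ_of_le (bSkipStr_length_le _ _)
  · simp
  · simp

-- pairs.get(stack[-1]): the closer expected for an opener on the stack, a non-bracket otherwise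
def pyExpected (c : Char) : Char :=
  if c = '(' then ')' else if c = '[' then ']' else if c = '{' then '}' else ' '

-- stage 2: one stack-matching step
def pyBStackStep (stack : List Char) (c : Char) : List Char :=
  if stack ≠ [] ∧ stack.getLast?.map pyExpected = some c then stack.dropLast
  else if c = '(' ∨ c = '[' ∨ c = '{' then stack ++ [c]
  else stack

def count_unclosed_brackets_py_alt (text : String) : Int :=
  (((bScan text.toList).foldl pyBStackStep []).length : Int)

-- ===== PRECONDITION & SPEC =====
def Spec_count_unclosed_brackets_py (text : String) (out : Int) : Prop := out = count_unclosed_brackets_py_alt text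
instance (text : String) (out : Int) : Decidable (Spec_count_unclosed_brackets_py text out) := by unfold Spec_count_unclosed_brackets_py; infer_instance

-- ===== CLAIM (what is proved, stated in full; the proofs are below) =====
def Claim_equal_count_unclosed_brackets_py : Prop := ∀ (text : String), Dom_count_unclosed_brackets_py text → Spec_count_unclosed_brackets_py text (count_unclosed_brackets_py text)

-- ===== LEMMAS AND PROOFS =====

-- while in string state `some q`, A's stack is untouched until bSkipStr's exit point
theorem foldl_string_state (q : Char) (l : List Char)
    (hq : q = '"' ∨ q = '\'' ∨ q = '`') (st : List Char) :
    (l.foldl pyAStep (st, some q, false)).1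
      = ((bSkipStr q l).foldl pyAStep (st, none, false)).1 := by
  fun_induction bSkipStr q l with
  | case1 => simp
  | case2 rest ih =>
    cases rest with
    | nil => simp [pyAStep, bSkipStr]
    | cons e rest' => simpa [pyAStep] using ih
  | case3 rest hne =>
    rcases hq with h | h | h <;> subst h <;> simp [pyAStep]
  | case4 d rest hd hdq ih =>
    have hstep : pyAStep (st, some q, false) d = (st, some q, false) := by
      by_cases hquote : d = '"' ∨ d = '\'' ∨ d = '`'
      · have : ¬ (some q = some d) := by simpa using fun h => hdq h.symm
        simp [pyAStep, hd, hquote, this]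
      · simp [pyAStep, hd, hquote]
    simpa [hstep] using ih

-- A's bracket handling agrees pointwise with B's stage-2 step on bracket characters
theorem step_bracket (st : List Char) (c : Char)
    (hc : c = '(' ∨ c = ')' ∨ c = '[' ∨ c = ']' ∨ c = '{' ∨ c = '}') :
    pyAStep (st, none, false) c = (pyBStackStep st c, none, false) := by
  rcases hc with h | h | h | h | h | h <;> subst h <;>
  · simp only [pyAStep, pyBStackStep]
    cases hl : st.getLast? with
    | none =>
      have : st = [] := by simpa using List.getLast?_eq_none_iff.mp hl
      simp [this, pyExpected]
    | some t =>
      have hne : st ≠ [] := by rintro rfl; simp at hl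
      by_cases ht : (t = '(' ∨ t = '[' ∨ t = '{')
      · rcases ht with h | h | h <;> subst h <;> simp [hl, hne, pyExpected]
      · push_neg at ht
        obtain ⟨h1, h2, h3⟩ := ht
        simp [hl, hne, pyExpected, h1, h2, h3]

-- main fusion: A's fold equals stage 2 run over stage 1's output
theorem main_fusion (cs : List Char) (st : List Char) :
    (cs.foldl pyAStep (st, none, false)).1 = (bScan cs).foldl pyBStackStep st := by
  fun_induction bScan cs generalizing st with
  | case1 => simp
  | case2 rest ih =>
    cases rest with
    | nil => simp [pyAStep, bScan]
    | cons e rest' => simpa [pyAStep] using ih st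
  | case3 c rest hc hq ih =>
    have hstep : pyAStep (st, none, false) c = (st, some c, false) := by
      rcases hq with h | h | h <;> simp [pyAStep, h]
    calc ((c :: rest).foldl pyAStep (st, none, false)).1
        = (rest.foldl pyAStep (st, some c, false)).1 := by simp [hstep]
      _ = ((bSkipStr c rest).foldl pyAStep (st, none, false)).1 := foldl_string_state c rest hq st
      _ = (bScan (bSkipStr c rest)).foldl pyBStackStep st := ih st
  | case4 c rest hc hq hb ih =>
    simp only [List.foldl_cons, step_bracket st c hb]
    exact ih (pyBStackStep st c)
  | case5 c rest hc hq hb ih =>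
    have hstep : pyAStep (st, none, false) c = (st, none, false) := by
      push Not at hb
      obtain ⟨b1, b2, b3, b4, b5, b6⟩ := hb
      simp [pyAStep, hc, hq, b1, b2, b3, b4, b5, b6]
    simpa [hstep] using ih st

-- ===== VERDICT (by name: the statement is the Claim_ definition above) =====
theorem count_unclosed_brackets_py_spec : Claim_equal_count_unclosed_brackets_py := by
  intro text _
  unfold Spec_count_unclosed_brackets_py count_unclosed_brackets_py count_unclosed_brackets_py_alt
  rw [main_fusion]
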